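-- pv_equiv track=rewrite | github.com/zanmagerl/advent-of-code | 2019/day04/day04.py | is_repeated_exactly_twice
-- ===== SOURCE A (Python) =====
-- def is_repeated_exactly_twice(a):
--     i = 1
--     a = str(a)
--     while i < len(a):
--         if a[i] == a[i-1]:
--             number_of_occurences = 2
--
--             number = a[i]
--             i = i+1
--             while i < len(a) and a[i] == number:
--                 number_of_occurences += 1
--                 i += 1
--
--             if number_of_occurences == 2:
--                 return True
--         i += 1
--     return False
-- ===== SOURCE B (Python) =====
-- def is_repeated_exactly_twice(a):
--     s = str(a)
--     return any(
--         s[i] == s[i - 1]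
--         and (i == 1 or s[i - 2] != s[i - 1])
--         and (i + 1 == len(s) or s[i + 1] != s[i])
--         for i in range(1, len(s))
--     )
-- ===== Notes on version B (the rewrite author's own statement) =====
-- stated objective: simpler
-- what changed: A's nested while-loops with an explicit run counter are replaced by a single flat any-scan over indices that detects a length-2 run locally from its two boundaries (different char or string edge on each side).
import Mathlib
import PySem

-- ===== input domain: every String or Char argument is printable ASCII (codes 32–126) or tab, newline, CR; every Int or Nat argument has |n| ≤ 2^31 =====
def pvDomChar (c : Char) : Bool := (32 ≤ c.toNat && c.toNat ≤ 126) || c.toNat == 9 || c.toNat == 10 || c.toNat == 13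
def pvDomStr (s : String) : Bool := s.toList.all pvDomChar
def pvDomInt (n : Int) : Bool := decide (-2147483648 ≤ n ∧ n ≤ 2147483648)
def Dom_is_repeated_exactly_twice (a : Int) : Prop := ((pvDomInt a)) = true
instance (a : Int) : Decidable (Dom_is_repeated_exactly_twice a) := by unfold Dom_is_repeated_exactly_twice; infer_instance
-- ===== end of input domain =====

-- B replaces A's nested while-loops (an inner run counter) by a single flat any-scan that
-- recognises a length-2 run locally from its boundaries; objective: simpler.
-- Both ports index str(a) only at positions guarded to be in range, so List.getD is exact there.

-- ===== PORT A =====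
-- inner while loop: counts the run of `number` from index i; returns the final (i, occurrences)
def aInner (s : List Char) (number : Char) (i occ : Nat) : Nat × Nat :=
  if i < s.length ∧ s.getD i ' ' = number then aInner s number (i + 1) (occ + 1)
  else (i, occ)
termination_by s.length - i
decreasing_by omega

-- needed by aLoop's termination proof
theorem aInner_fst_ge (s : List Char) (number : Char) (i occ : Nat) :
    i ≤ (aInner s number i occ).1 := by
  induction i, occ using aInner.induct s number with
  | case1 i occ h ih => rw [aInner, if_pos h]; omega
  | case2 i occ h => rw [aInner, if_neg h]

-- outer while loop of A
def aLoop (s : List Char) (i : Nat) : Bool :=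
  if h : i < s.length then
    if s.getD i ' ' = s.getD (i - 1) ' ' then
      let p := aInner s (s.getD i ' ') (i + 1) 2
      if p.2 = 2 then true else aLoop s (p.1 + 1)
    else aLoop s (i + 1)
  else false
termination_by s.length - i
decreasing_by
  · have := aInner_fst_ge s (s.getD i ' ') (i + 1) 2; omega
  · omega

def is_repeated_exactly_twice (a : Int) : Bool :=
  aLoop (PySem.Int.toStr a).toList 1

-- ===== PORT B =====
-- the per-index boundary test of Source B's generator expression
def bCond (s : List Char) (i : Nat) : Bool :=
  (s.getD i ' ' == s.getD (i - 1) ' ')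
    && (i == 1 || s.getD (i - 2) ' ' != s.getD (i - 1) ' ')
    && (i + 1 == s.length || s.getD (i + 1) ' ' != s.getD i ' ')

def is_repeated_exactly_twice_alt (a : Int) : Bool :=
  let s := (PySem.Int.toStr a).toList
  (List.range' 1 (s.length - 1)).any (bCond s)

-- ===== PRECONDITION & SPEC =====
def Spec_is_repeated_exactly_twice (a : Int) (out : Bool) : Prop := out = is_repeated_exactly_twice_alt a
instance (a : Int) (out : Bool) : Decidable (Spec_is_repeated_exactly_twice a out) := by unfold Spec_is_repeated_exactly_twice; infer_instance

-- ===== CLAIM (what is proved, stated in full; the proofs are below) =====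
def Claim_equal_is_repeated_exactly_twice : Prop := ∀ (a : Int), Dom_is_repeated_exactly_twice a → Spec_is_repeated_exactly_twice a (is_repeated_exactly_twice a)

-- ===== LEMMAS AND PROOFS =====

theorem aInner_spec (s : List Char) (c : Char) (i occ : Nat) (hle : i ≤ s.length) :
    i ≤ (aInner s c i occ).1 ∧ (aInner s c i occ).1 ≤ s.length ∧
    (aInner s c i occ).2 + i = occ + (aInner s c i occ).1 ∧
    (∀ j, i ≤ j → j < (aInner s c i occ).1 → s.getD j ' ' = c) ∧
    ((aInner s c i occ).1 < s.length → s.getD (aInner s c i occ).1 ' ' ≠ c) := by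
  induction i, occ using aInner.induct s c with
  | case1 i occ h ih =>
    rw [aInner, if_pos h]
    obtain ⟨h1, h2, h3, h4, h5⟩ := ih (by omega)
    refine ⟨by omega, h2, by omega, ?_, h5⟩
    intro j hj1 hj2
    rcases Nat.eq_or_lt_of_le hj1 with rfl | hlt
    · exact h.2
    · exact h4 j hlt hj2
  | case2 i occ h =>
    rw [aInner, if_neg h]
    refine ⟨le_refl _, hle, by omega, fun j hj1 hj2 => absurd hj2 (by omega), ?_⟩
    intro hlen
    simpa [hlen] using h

theorem aLoop_correct (s : List Char) (n : Nat) : ∀ i, s.length - i ≤ n → 1 ≤ i →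
    (2 ≤ i → i < s.length → s.getD (i - 2) ' ' ≠ s.getD (i - 1) ' ') →
    (aLoop s i = true ↔ ∃ j, i ≤ j ∧ j < s.length ∧ bCond s j = true) := by
  induction n with
  | zero =>
    intro i hn h1 hinv
    rw [aLoop, dif_neg (by omega)]
    constructor
    · intro h; exact absurd h (by simp)
    · rintro ⟨j, hj1, hj2, _⟩; omega
  | succ n ih =>
    intro i hn h1 hinv
    by_cases hi : i < s.length
    · rw [aLoop, dif_pos hi]
      by_cases heq : s.getD i ' ' = s.getD (i - 1) ' '
      · rw [if_pos heq]
        set c := s.getD i ' ' with hc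
        obtain ⟨k1, k2, k3, k4, k5⟩ := aInner_spec s c (i + 1) 2 (by omega)
        set i' := (aInner s c (i + 1) 2).1 with hi'
        -- every position in [i-1, i') holds c
        have hrun : ∀ j, i - 1 ≤ j → j < i' → s.getD j ' ' = c := by
          intro j hj1 hj2
          rcases Nat.lt_or_ge j i with hlt | hge
          · have : j = i - 1 := by omega
            rw [this]; exact heq.symm
          · rcases Nat.eq_or_lt_of_le hge with rfl | hgt
            · rfl
            · exact k4 j (by omega) hj2
        by_cases hocc : (aInner s c (i + 1) 2).2 = 2
        · -- run has length exactly 2: A returns true, and bCond holds at i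
          rw [if_pos hocc]
          have hii : i' = i + 1 := by omega
          constructor
          · intro _
            refine ⟨i, le_refl _, hi, ?_⟩
            simp only [bCond, Bool.and_eq_true, Bool.or_eq_true, beq_iff_eq, bne_iff_ne, ne_eq]
            refine ⟨⟨heq, ?_⟩, ?_⟩
            · by_cases h2i : i = 1
              · left; simp [h2i]
              · right; exact hinv (by omega) hi
            · by_cases hend : i + 1 = s.length
              · left; simp [hend]
              · right
                rw [hii] at k5
                exact k5 (by omega)
          · intro _; rfl
        · -- run longer than 2: A skips past it; no bCond index inside the run
          rw [if_neg hocc]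
          have hgt : i + 1 < i' := by omega
          have hstep := ih (i' + 1) (by omega) (by omega) ?inv
          case inv =>
            intro _ hlt
            have e1 : i' + 1 - 2 = i' - 1 := by omega
            have e2 : i' + 1 - 1 = i' := by omega
            rw [e1, e2, hrun (i' - 1) (by omega) (by omega)]
            exact fun h => k5 (by omega) h.symm
          rw [hstep]
          constructor
          · rintro ⟨j, hj1, hj2, hj3⟩; exact ⟨j, by omega, hj2, hj3⟩
          · rintro ⟨j, hj1, hj2, hj3⟩
            refine ⟨j, ?_, hj2, hj3⟩
            by_contra hjle
            -- j ∈ [i, i']; show bCond s j fails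
            simp only [bCond, Bool.and_eq_true, Bool.or_eq_true, beq_iff_eq, bne_iff_ne, ne_eq] at hj3
            obtain ⟨⟨c1, c2⟩, c3⟩ := hj3
            rcases Nat.eq_or_lt_of_le hj1 with rfl | hjgt
            · -- j = i : the next char also equals c
              rcases c3 with h | h
              · omega
              · exact h (hrun (i + 1) (by omega) (by omega))
            · rcases Nat.lt_or_ge j i' with hji' | hji'
              · -- i < j < i' : previous two chars both equal c
                rcases c2 with h | h
                · omega
                · exact h (by
                    rw [hrun (j - 2) (by omega) (by omega), hrun (j - 1) (by omega) (by omega)])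
              · -- j = i' : pair is unequal
                have hj : j = i' := by omega
                subst hj
                exact absurd (c1.trans (hrun (i' - 1) (by omega) (by omega))) (k5 hj2)
      · rw [if_neg heq]
        have hstep := ih (i + 1) (by omega) (by omega) ?inv2
        case inv2 =>
          intro _ _
          have e1 : i + 1 - 2 = i - 1 := by omega
          have e2 : i + 1 - 1 = i := by omega
          rw [e1, e2]
          exact fun h => heq h.symm
        rw [hstep]
        constructor
        · rintro ⟨j, hj1, hj2, hj3⟩; exact ⟨j, by omega, hj2, hj3⟩
        · rintro ⟨j, hj1, hj2, hj3⟩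
          refine ⟨j, ?_, hj2, hj3⟩
          rcases Nat.eq_or_lt_of_le hj1 with rfl | h
          · exfalso
            simp only [bCond, Bool.and_eq_true, beq_iff_eq] at hj3
            exact heq hj3.1.1
          · omega
    · rw [aLoop, dif_neg hi]
      constructor
      · intro h; exact absurd h (by simp)
      · rintro ⟨j, hj1, hj2, _⟩; omega

theorem alt_iff (s : List Char) :
    (List.range' 1 (s.length - 1)).any (bCond s) = true ↔
    ∃ j, 1 ≤ j ∧ j < s.length ∧ bCond s j = true := by
  rw [List.any_eq_true]
  constructor
  · rintro ⟨j, hj, hb⟩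
    rw [List.mem_range'_1] at hj
    exact ⟨j, hj.1, by omega, hb⟩
  · rintro ⟨j, hj1, hj2, hb⟩
    exact ⟨j, List.mem_range'_1.mpr ⟨hj1, by omega⟩, hb⟩

-- ===== VERDICT (by name: the statement is the Claim_ definition above) =====
theorem is_repeated_exactly_twice_spec : Claim_equal_is_repeated_exactly_twice := by
  intro a _
  unfold Spec_is_repeated_exactly_twice is_repeated_exactly_twice is_repeated_exactly_twice_alt
  set s := (PySem.Int.toStr a).toList
  rw [Bool.eq_iff_iff, alt_iff s]
  exact aLoop_correct s (s.length - 1) 1 (by omega) (by omega) (by omega)
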